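-- pv_equiv track=rewrite | github.com/capwitf/CodeTopo | CodeTopo/languages/java_parser.py | _find_enclosing_method
-- ===== SOURCE A (Python) =====
-- from typing import Optional
--
-- def _find_enclosing_method(line, method_ranges) -> Optional[str]:
--     best_name = None
--     best_size = float("inf")
--     for start, end, name in method_ranges:
--         if start <= line <= end and (end - start) < best_size:
--             best_name = name
--             best_size = end - start
--     return best_name
-- ===== SOURCE B (Python) =====
-- from typing import Optional
--
-- def _find_enclosing_method(line, method_ranges) -> Optional[str]:
--     # Stable-sort the ranges by span, then return the first one containing
--     # the line: it has the minimal span, and stability keeps A's first-seen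
--     # tie-breaking among equal spans.
--     for start, end, name in sorted(method_ranges, key=lambda r: r[1] - r[0]):
--         if start <= line <= end:
--             return name
--     return None
-- ===== Notes on version B (the rewrite author's own statement) =====
-- stated objective: alternative
-- what changed: Replaces A's single pass with a running best name/size pair by a sort-then-scan algorithm: stable-sort all ranges by span, then return the name of the first range in sorted order containing the line (stability reproduces A's first-seen tie-breaking); None if the scan finds nothing.
import Mathlib
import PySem

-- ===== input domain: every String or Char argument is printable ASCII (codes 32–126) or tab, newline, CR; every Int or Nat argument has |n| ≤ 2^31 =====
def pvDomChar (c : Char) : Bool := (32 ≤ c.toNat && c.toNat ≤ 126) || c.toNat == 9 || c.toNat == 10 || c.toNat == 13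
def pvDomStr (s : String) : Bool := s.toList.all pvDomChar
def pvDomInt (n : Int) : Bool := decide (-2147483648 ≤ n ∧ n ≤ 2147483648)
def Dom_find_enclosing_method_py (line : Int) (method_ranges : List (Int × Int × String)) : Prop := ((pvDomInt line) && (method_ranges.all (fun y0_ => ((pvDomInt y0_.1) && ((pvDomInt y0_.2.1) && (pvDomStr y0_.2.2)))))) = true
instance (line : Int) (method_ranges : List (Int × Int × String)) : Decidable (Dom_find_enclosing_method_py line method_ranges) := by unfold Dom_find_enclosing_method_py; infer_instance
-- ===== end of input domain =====

-- B replaces A's single running-best loop by a sort-then-scan algorithm: stable-sort by span,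
-- return the first containing range (objective: alternative). Equivalence proved on all inputs.

-- ===== PORT A =====
-- loop body of A: state is (best_name, best_size); best_size = none models float("inf"),
-- which every int compares < against
def pvStepA (line : Int) (st : Option String × Option Int) (x : Int × Int × String) :
    Option String × Option Int :=
  match st.2 with
  | none =>      -- best_size is still float("inf"): any size beats it
    if x.1 ≤ line ∧ line ≤ x.2.1 then (some x.2.2, some (x.2.1 - x.1)) else st
  | some b =>
    if x.1 ≤ line ∧ line ≤ x.2.1 ∧ x.2.1 - x.1 < b then (some x.2.2, some (x.2.1 - x.1)) else st

def find_enclosing_method_py (line : Int) (method_ranges : List (Int × Int × String)) : Option String :=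
  (method_ranges.foldl (pvStepA line) (none, none)).1

-- ===== PORT B =====
-- for … in sorted(method_ranges, key=span): if start <= line <= end: return name; return None
def find_enclosing_method_py_alt (line : Int) (method_ranges : List (Int × Int × String)) : Option String :=
  ((PySem.List.sorted method_ranges (fun r => r.2.1 - r.1)).find?
      (fun r => decide (r.1 ≤ line ∧ line ≤ r.2.1))).map (fun r => r.2.2)

-- ===== PRECONDITION & SPEC =====
def Spec_find_enclosing_method_py (line : Int) (method_ranges : List (Int × Int × String)) (out : Option String) : Prop := out = find_enclosing_method_py_alt line method_ranges
instance (line : Int) (method_ranges : List (Int × Int × String)) (out : Option String) : Decidable (Spec_find_enclosing_method_py line method_ranges out) := by unfold Spec_find_enclosing_method_py; infer_instance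

-- ===== CLAIM (what is proved, stated in full; the proofs are below) =====
def Claim_equal_find_enclosing_method_py : Prop := ∀ (line : Int) (method_ranges : List (Int × Int × String)), Dom_find_enclosing_method_py line method_ranges → Spec_find_enclosing_method_py line method_ranges (find_enclosing_method_py line method_ranges)

-- ===== LEMMAS AND PROOFS =====

-- span key and containment predicate, abbreviations for the proofs
def pvKey (r : Int × Int × String) : Int := r.2.1 - r.1
def pvP (line : Int) (r : Int × Int × String) : Bool := decide (r.1 ≤ line ∧ line ≤ r.2.1)
def pvBefore (a b : Int × Int × String) : Bool := decide (pvKey a < pvKey b)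

-- view an optional range as A's loop state
def pvStateOf (o : Option (Int × Int × String)) : Option String × Option Int :=
  (o.map (fun r => r.2.2), o.map pvKey)

-- insertBy keeps a key-sorted list key-sorted
theorem pv_pairwise_insertBy (x : Int × Int × String) :
    ∀ (acc : List (Int × Int × String)),
      acc.Pairwise (fun a b => pvKey a ≤ pvKey b) →
      (PySem.List.insertBy pvBefore x acc).Pairwise (fun a b => pvKey a ≤ pvKey b) := by
  intro acc
  induction acc with
  | nil => intro _; simp [PySem.List.insertBy]
  | cons y ys ih =>
    intro hp
    rw [List.pairwise_cons] at hp
    by_cases h : pvBefore x y = true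
    · rw [show PySem.List.insertBy pvBefore x (y :: ys) = x :: y :: ys from by
        simp [PySem.List.insertBy, h]]
      have hxy : pvKey x ≤ pvKey y := by
        have := of_decide_eq_true h; omega
      refine List.pairwise_cons.2 ⟨?_, List.pairwise_cons.2 hp⟩
      intro z hz
      rcases List.mem_cons.1 hz with rfl | hz
      · exact hxy
      · exact le_trans hxy (hp.1 z hz)
    · rw [show PySem.List.insertBy pvBefore x (y :: ys) = y :: PySem.List.insertBy pvBefore x ys from by
        simp [PySem.List.insertBy, h]]
      have hyx : pvKey y ≤ pvKey x := by
        simp only [pvBefore, decide_eq_true_eq] at h; omega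
      refine List.pairwise_cons.2 ⟨?_, ih hp.2⟩
      intro z hz
      rcases (PySem.List.mem_insertBy pvBefore x z ys).1 hz with rfl | hz
      · exact hyx
      · exact hp.1 z hz

-- how inserting one element into a key-sorted list moves its first P-element:
-- exactly A's running-best update
theorem pv_find?_insertBy (line : Int) (x : Int × Int × String) :
    ∀ (acc : List (Int × Int × String)),
      acc.Pairwise (fun a b => pvKey a ≤ pvKey b) →
      (PySem.List.insertBy pvBefore x acc).find? (pvP line)
      = if pvP line x then
          match acc.find? (pvP line) with
          | none => some x
          | some m => if pvKey m ≤ pvKey x then some m else some x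
        else acc.find? (pvP line) := by
  intro acc
  induction acc with
  | nil =>
    intro _
    by_cases hx : pvP line x = true <;> simp [PySem.List.insertBy, List.find?, hx]
  | cons y ys ih =>
    intro hp
    rw [List.pairwise_cons] at hp
    by_cases h : pvBefore x y = true
    · rw [show PySem.List.insertBy pvBefore x (y :: ys) = x :: y :: ys from by
        simp [PySem.List.insertBy, h]]
      have hxy : pvKey x < pvKey y := of_decide_eq_true h
      by_cases hx : pvP line x = true
      · rw [show (x :: y :: ys).find? (pvP line) = some x from by simp [List.find?, hx]]
        rw [if_pos hx]
        cases hm : (y :: ys).find? (pvP line) with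
        | none => rfl
        | some m =>
          have hmem : m ∈ y :: ys := List.mem_of_find?_eq_some hm
          have hym : pvKey y ≤ pvKey m := by
            rcases List.mem_cons.1 hmem with rfl | hmem
            · exact le_refl _
            · exact hp.1 m hmem
          show some x = if pvKey m ≤ pvKey x then some m else some x
          rw [if_neg (by omega)]
      · simp [List.find?, hx]
    · rw [show PySem.List.insertBy pvBefore x (y :: ys) = y :: PySem.List.insertBy pvBefore x ys from by
        simp [PySem.List.insertBy, h]]
      have hyx : pvKey y ≤ pvKey x := by
        simp only [pvBefore, decide_eq_true_eq] at h; omega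
      by_cases hy : pvP line y = true
      · rw [show (y :: PySem.List.insertBy pvBefore x ys).find? (pvP line) = some y from by
          simp [List.find?, hy]]
        rw [show (y :: ys).find? (pvP line) = some y from by simp [List.find?, hy]]
        by_cases hx : pvP line x = true
        · rw [if_pos hx]
          split <;> simp_all [ite_self]
        · rw [if_neg (by simp [hx])]
      · rw [show (y :: PySem.List.insertBy pvBefore x ys).find? (pvP line)
            = (PySem.List.insertBy pvBefore x ys).find? (pvP line) from by
          simp [List.find?, hy]]
        rw [show (y :: ys).find? (pvP line) = ys.find? (pvP line) from by simp [List.find?, hy]]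
        exact ih hp.2

-- one step of A's loop matches one insertion on the B side
theorem pv_step_eq (line : Int) (x : Int × Int × String)
    (acc : List (Int × Int × String))
    (hp : acc.Pairwise (fun a b => pvKey a ≤ pvKey b)) :
    pvStepA line (pvStateOf (acc.find? (pvP line))) x
    = pvStateOf ((PySem.List.insertBy pvBefore x acc).find? (pvP line)) := by
  rw [pv_find?_insertBy line x acc hp]
  by_cases hx : pvP line x = true
  · rw [if_pos hx]
    have hx' : x.1 ≤ line ∧ line ≤ x.2.1 := of_decide_eq_true hx
    cases hm : acc.find? (pvP line) with
    | none => simp [pvStepA, pvStateOf, pvKey, hx'.1, hx'.2]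
    | some m =>
      show pvStepA line (pvStateOf (some m)) x
        = pvStateOf (if pvKey m ≤ pvKey x then some m else some x)
      by_cases hlt : pvKey m ≤ pvKey x
      · rw [if_pos hlt]
        simp only [pvStateOf, Option.map_some, pvStepA]
        rw [if_neg (by simp only [pvKey] at hlt ⊢; intro hcon; omega)]
      · rw [if_neg hlt]
        simp only [pvStateOf, Option.map_some, pvStepA]
        rw [if_pos (by simp only [pvKey] at hlt ⊢; exact ⟨hx'.1, hx'.2, by omega⟩)]
        simp [pvKey]
  · rw [if_neg (by simp [hx])]
    have hx' : ¬ (x.1 ≤ line ∧ line ≤ x.2.1) := by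
      intro hcon; exact hx (decide_eq_true hcon)
    cases hm : acc.find? (pvP line) with
    | none => simp [pvStepA, pvStateOf, hx']
    | some m =>
      simp only [pvStateOf, Option.map_some, pvStepA]
      rw [if_neg (fun hcon => hx' ⟨hcon.1, hcon.2.1⟩)]

-- the loop invariant: A's fold over a suffix = first P-element of B's insertion fold
theorem pv_fold_eq (line : Int) :
    ∀ (l acc : List (Int × Int × String)),
      acc.Pairwise (fun a b => pvKey a ≤ pvKey b) →
      l.foldl (pvStepA line) (pvStateOf (acc.find? (pvP line)))
      = pvStateOf ((l.foldl (fun a x => PySem.List.insertBy pvBefore x a) acc).find? (pvP line)) := by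
  intro l
  induction l with
  | nil => intro acc _; rfl
  | cons x t ih =>
    intro acc hp
    simp only [List.foldl_cons]
    rw [pv_step_eq line x acc hp]
    exact ih _ (pv_pairwise_insertBy x acc hp)

-- ===== VERDICT (by name: the statement is the Claim_ definition above) =====
theorem find_enclosing_method_py_spec : Claim_equal_find_enclosing_method_py := by
  intro line mr _
  unfold Spec_find_enclosing_method_py find_enclosing_method_py find_enclosing_method_py_alt
  have h := pv_fold_eq line mr [] List.Pairwise.nil
  simp only [List.find?] at h
  rw [show (pvStateOf none) = ((none : Option String), (none : Option Int)) from rfl] at h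
  rw [h]
  rw [PySem.List.sorted_eq_foldl_insertBy mr (fun r => r.2.1 - r.1)]
  rfl
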